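-- pv_equiv track=rewrite | github.com/destinyson7/All-Codes | Google/FooBar/level3_problem1.py | solution
-- ===== SOURCE A (Python) =====
-- def pref_xor(l):
--     if l <= 0:
--         return 0
--
--     rem = l % 4
--
--     if rem == 0:
--         return l
--
--     elif rem == 1:
--         return 1
--
--     elif rem == 2:
--         return l + 1
--
--     else:
--         return 0
--
-- def xor(l, r):
--     return (pref_xor(r) ^ pref_xor(l - 1))
--
-- def solution(start, length):
--     ans = 0
--     skip = 0
--
--     for i in range(length):
--         ans ^= xor(start, start + length - 1 - skip)
--         skip += 1
--         start += length
--
--     return int(ans)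
-- ===== SOURCE B (Python) =====
-- def solution(start, length):
--     # Bit-parity view of the checksum XOR: in XOR(0..m), every bit k >= 1 equals
--     # bit k of m when m is even and is 0 when m is odd, while bit 0 is the parity
--     # of (m+1)//2.  Each row contributes its two boundaries (the cell below its
--     # first kept cell, and its last kept cell), so the whole answer splits into
--     # two independent accumulators: the XOR of the even, non-negative boundary
--     # values (their bit 0 is always 0) and one running parity bit, merged at the end.
--     high = 0   # XOR of even boundary values
--     low = 0    # running parity for bit 0
--     row_start = start
--     for i in range(length):
--         for p in (row_start - 1, row_start + length - 1 - i):
--             if p >= 0: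
--                 if p % 2 == 0:
--                     high ^= p
--                 low ^= (p + 1) // 2 % 2
--         row_start += length
--     return high ^ low
-- ===== Notes on version B (the rewrite author's own statement) =====
-- stated objective: alternative
-- what changed: B discards the pref_xor mod-4 table and the per-row xor(start, end) prefix-difference: it splits the answer by bit position (in XOR(0..m) every bit k>=1 equals bit k of m when m is even and 0 when m is odd, and bit 0 is the parity of (m+1)//2), maintaining two independent accumulators over the row boundaries - the XOR of the even non-negative boundary values and one running parity bit - merged once at the end; same O(length) cost, a different decomposition of the result.
import Mathlib
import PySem

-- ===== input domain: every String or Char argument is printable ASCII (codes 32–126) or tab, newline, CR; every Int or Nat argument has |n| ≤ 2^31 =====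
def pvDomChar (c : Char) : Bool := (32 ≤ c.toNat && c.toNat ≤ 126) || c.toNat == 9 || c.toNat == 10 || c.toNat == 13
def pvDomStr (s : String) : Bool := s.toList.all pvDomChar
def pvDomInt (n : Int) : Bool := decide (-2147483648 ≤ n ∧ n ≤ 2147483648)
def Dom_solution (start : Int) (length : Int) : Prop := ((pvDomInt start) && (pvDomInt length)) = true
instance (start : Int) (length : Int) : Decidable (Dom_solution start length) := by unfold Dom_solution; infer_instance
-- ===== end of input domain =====

-- B replaces A's pref_xor mod-4 table and per-row prefix-difference by a bit-parity
-- split of the answer: two independent accumulators over the row boundaries (XOR of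
-- the even boundary values, and one counted parity bit), merged at the end
-- (alternative: same O(length) cost, different decomposition).


-- ===== PORT A =====
def prefXor (l : Int) : Int :=
  if l ≤ 0 then 0
  else
    let rem := PySem.Int.mod l 4
    if rem = 0 then l
    else if rem = 1 then 1
    else if rem = 2 then l + 1
    else 0

def xorFn (l : Int) (r : Int) : Int :=
  PySem.Int.bxor (prefXor r) (prefXor (l - 1))

def solution (start : Int) (length : Int) : Int :=
  ((PySem.List.pyRange 0 length 1).foldl
    (fun (s : Int × Int × Int) _i =>
      (PySem.Int.bxor s.1 (xorFn s.2.2 (s.2.2 + length - 1 - s.2.1)), s.2.1 + 1, s.2.2 + length))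
    (0, 0, start)).1

-- ===== PORT B =====
-- one boundary point p folded into the pair (high, low)
def bstep (s : Int × Int) (p : Int) : Int × Int :=
  if 0 ≤ p then
    (if PySem.Int.mod p 2 = 0 then PySem.Int.bxor s.1 p else s.1,
     PySem.Int.bxor s.2 (PySem.Int.mod (PySem.Int.floordiv (p + 1) 2) 2))
  else s

def solution_alt (start : Int) (length : Int) : Int :=
  let r := (PySem.List.pyRange 0 length 1).foldl
    (fun (s : Int × Int × Int) i =>
      let t := [s.1 - 1, s.1 + length - 1 - i].foldl (fun q p => bstep q p) (s.2.1, s.2.2)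
      (s.1 + length, t.1, t.2))
    (start, 0, 0)
  PySem.Int.bxor r.2.1 r.2.2

-- ===== PRECONDITION & SPEC =====
def Spec_solution (start : Int) (length : Int) (out : Int) : Prop := out = solution_alt start length
instance (start : Int) (length : Int) (out : Int) : Decidable (Spec_solution start length out) := by
  unfold Spec_solution; infer_instance

-- ===== CLAIM (what is proved, stated in full; the proofs are below) =====
def Claim_equal_solution : Prop := ∀ (start : Int) (length : Int), Dom_solution start length → Spec_solution start length (solution start length)

-- ===== LEMMAS AND PROOFS =====

theorem prefXor_nonneg (n : Int) : 0 ≤ prefXor n := by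
  simp only [prefXor]
  split_ifs <;> omega

theorem prefXor_eq (n : Int) (hn : 0 ≤ n) :
    prefXor n = if n % 4 = 0 then n else if n % 4 = 1 then 1 else if n % 4 = 2 then n + 1 else 0 := by
  simp only [prefXor]
  rw [PySem.Int.mod_eq_emod_of_pos (by norm_num)]
  split_ifs <;> omega

theorem bxor_nonneg (a b : Int) (ha : 0 ≤ a) (hb : 0 ≤ b) : 0 ≤ PySem.Int.bxor a b := by
  obtain ⟨A, hA⟩ : ∃ A : Nat, a = (A : Int) := ⟨_, (Int.toNat_of_nonneg ha).symm⟩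
  obtain ⟨B, hB⟩ : ∃ B : Nat, b = (B : Int) := ⟨_, (Int.toNat_of_nonneg hb).symm⟩
  rw [hA, hB, PySem.Int.bxor_natCast]
  positivity

-- associativity/commutativity shuffle for non-negative integers
theorem bxor_ac (a b c d : Int) (ha : 0 ≤ a) (hb : 0 ≤ b) (hc : 0 ≤ c) (hd : 0 ≤ d) :
    PySem.Int.bxor (PySem.Int.bxor a c) (PySem.Int.bxor b d)
      = PySem.Int.bxor (PySem.Int.bxor a b) (PySem.Int.bxor c d) := by
  obtain ⟨A, hA⟩ : ∃ A : Nat, a = (A : Int) := ⟨_, (Int.toNat_of_nonneg ha).symm⟩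
  obtain ⟨B, hB⟩ : ∃ B : Nat, b = (B : Int) := ⟨_, (Int.toNat_of_nonneg hb).symm⟩
  obtain ⟨C, hC⟩ : ∃ C : Nat, c = (C : Int) := ⟨_, (Int.toNat_of_nonneg hc).symm⟩
  obtain ⟨D, hD⟩ : ∃ D : Nat, d = (D : Int) := ⟨_, (Int.toNat_of_nonneg hd).symm⟩
  rw [hA, hB, hC, hD]
  simp only [PySem.Int.bxor_natCast]
  norm_cast
  simp [Nat.xor_comm, Nat.xor_left_comm]

-- A's prefix XOR splits into B's two contributions: the even value itself, and bit 0.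
theorem prefXor_decomp (p : Int) :
    prefXor p = PySem.Int.bxor
      (if 0 ≤ p ∧ PySem.Int.mod p 2 = 0 then p else 0)
      (if 0 ≤ p then PySem.Int.mod (PySem.Int.floordiv (p + 1) 2) 2 else 0) := by
  by_cases hp : 0 ≤ p
  · rw [prefXor_eq p hp, PySem.Int.mod_eq_emod_of_pos (a := p) (by norm_num),
      PySem.Int.mod_eq_emod_of_pos (by norm_num), PySem.Int.floordiv_eq_ediv_of_pos (by norm_num),
      if_pos hp]
    by_cases h0 : p % 4 = 0
    · rw [if_pos h0, if_pos (⟨hp, by omega⟩ : 0 ≤ p ∧ p % 2 = 0),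
        show (p + 1) / 2 % 2 = 0 from by omega, PySem.Int.bxor_zero]
    · by_cases h1 : p % 4 = 1
      · rw [if_neg h0, if_pos h1, if_neg (show ¬ (0 ≤ p ∧ p % 2 = 0) from by omega),
          show (p + 1) / 2 % 2 = 1 from by omega, PySem.Int.bxor_comm, PySem.Int.bxor_zero]
      · by_cases h2 : p % 4 = 2
        · rw [if_neg h0, if_neg h1, if_pos h2, if_pos (⟨hp, by omega⟩ : 0 ≤ p ∧ p % 2 = 0),
            show (p + 1) / 2 % 2 = 1 from by omega]
          obtain ⟨A, hA⟩ : ∃ A : Nat, p = (A : Int) := ⟨_, (Int.toNat_of_nonneg hp).symm⟩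
          rw [hA, show (1 : Int) = ((1 : Nat) : Int) from rfl, PySem.Int.bxor_natCast,
            Nat.xor_one_of_even (Nat.even_iff.mpr (by omega))]
          push_cast; ring
        · rw [if_neg h0, if_neg h1, if_neg h2,
            if_neg (show ¬ (0 ≤ p ∧ p % 2 = 0) from by omega),
            show (p + 1) / 2 % 2 = 0 from by omega, PySem.Int.bxor_zero]
  · rw [if_neg (show ¬ (0 ≤ p ∧ PySem.Int.mod p 2 = 0) from by tauto), if_neg hp,
      PySem.Int.bxor_zero]
    simp only [prefXor]
    rw [if_pos (by omega)]

-- rotate one non-negative term across a XOR pair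
theorem bxor_rot (x a b : Int) (hx : 0 ≤ x) (ha : 0 ≤ a) (hb : 0 ≤ b) :
    PySem.Int.bxor (PySem.Int.bxor x a) b = PySem.Int.bxor x (PySem.Int.bxor b a) := by
  obtain ⟨X, hX⟩ : ∃ X : Nat, x = (X : Int) := ⟨_, (Int.toNat_of_nonneg hx).symm⟩
  obtain ⟨A, hA⟩ : ∃ A : Nat, a = (A : Int) := ⟨_, (Int.toNat_of_nonneg ha).symm⟩
  obtain ⟨B, hB⟩ : ∃ B : Nat, b = (B : Int) := ⟨_, (Int.toNat_of_nonneg hb).symm⟩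
  rw [hX, hA, hB]
  simp only [PySem.Int.bxor_natCast]
  norm_cast
  simp [Nat.xor_comm, Nat.xor_left_comm]

-- one bstep keeps both accumulators non-negative and folds prefXor p into their XOR
theorem bstep_ok (H L p : Int) (hH : 0 ≤ H) (hL : 0 ≤ L) :
    0 ≤ (bstep (H, L) p).1 ∧ 0 ≤ (bstep (H, L) p).2 ∧
      PySem.Int.bxor (bstep (H, L) p).1 (bstep (H, L) p).2
        = PySem.Int.bxor (PySem.Int.bxor H L) (prefXor p) := by
  have hd : prefXor p = PySem.Int.bxor
      (if 0 ≤ p ∧ PySem.Int.mod p 2 = 0 then p else 0)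
      (if 0 ≤ p then PySem.Int.mod (PySem.Int.floordiv (p + 1) 2) 2 else 0) := prefXor_decomp p
  by_cases hp : 0 ≤ p
  · have hm : 0 ≤ PySem.Int.mod (PySem.Int.floordiv (p + 1) 2) 2 := by
      rw [PySem.Int.mod_eq_emod_of_pos (by norm_num)]
      omega
    by_cases he : PySem.Int.mod p 2 = 0
    · simp only [bstep, if_pos hp, if_pos he]
      rw [hd, if_pos ⟨hp, he⟩, if_pos hp]
      exact ⟨bxor_nonneg H p hH hp, bxor_nonneg L _ hL hm, bxor_ac H L p _ hH hL hp hm⟩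
    · simp only [bstep, if_pos hp, if_neg he]
      rw [hd, if_neg (by tauto), if_pos hp]
      refine ⟨hH, bxor_nonneg L _ hL hm, ?_⟩
      have := bxor_ac H L 0 (PySem.Int.mod (PySem.Int.floordiv (p + 1) 2) 2)
        hH hL le_rfl hm
      rwa [PySem.Int.bxor_zero] at this
  · simp only [bstep, if_neg hp]
    rw [hd, if_neg (by tauto), if_neg hp, PySem.Int.bxor_zero, PySem.Int.bxor_zero]
    exact ⟨hH, hL, rfl⟩

-- Joint invariant: after m rows A's state is (x, m, st + m*L) and B's is (st + m*L, H, Lo)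
-- with x = H xor Lo.
theorem loops (L st : Int) : ∀ (m : Nat), (m : Int) ≤ L →
    ∃ x H Lo : Int, 0 ≤ H ∧ 0 ≤ Lo ∧ PySem.Int.bxor H Lo = x ∧
      ((PySem.List.pyRange 0 (m : Int) 1).foldl
        (fun (s : Int × Int × Int) _i =>
          (PySem.Int.bxor s.1 (xorFn s.2.2 (s.2.2 + L - 1 - s.2.1)), s.2.1 + 1, s.2.2 + L))
        (0, 0, st)) = (x, (m : Int), st + (m : Int) * L) ∧
      ((PySem.List.pyRange 0 (m : Int) 1).foldl
        (fun (s : Int × Int × Int) i =>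
          let t := [s.1 - 1, s.1 + L - 1 - i].foldl (fun q p => bstep q p) (s.2.1, s.2.2)
          (s.1 + L, t.1, t.2))
        (st, 0, 0)) = (st + (m : Int) * L, H, Lo) := by
  intro m
  induction m with
  | zero =>
    intro _
    refine ⟨0, 0, 0, le_rfl, le_rfl, by decide, ?_, ?_⟩ <;>
      simp [PySem.List.pyRange_one_eq_nil (le_refl (0 : Int))]
  | succ m ih =>
    intro h1
    have hL1 : (m : Int) + 1 ≤ L := by push_cast at h1; omega
    obtain ⟨x, H, Lo, hH, hLo, hmix, hA, hB⟩ := ih (by omega)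
    rw [show ((m + 1 : Nat) : Int) = (m : Int) + 1 from by push_cast; ring,
      PySem.List.pyRange_one_succ_right (by positivity : (0 : Int) ≤ (m : Int)),
      List.foldl_append, List.foldl_append, hA, hB]
    simp only [List.foldl_cons, List.foldl_nil]
    set rs := st + (m : Int) * L with hrs
    obtain ⟨h1n, h1n', h1eq⟩ := bstep_ok H Lo (rs - 1) hH hLo
    obtain ⟨h2n, h2n', h2eq⟩ := bstep_ok (bstep (H, Lo) (rs - 1)).1 (bstep (H, Lo) (rs - 1)).2
      (rs + L - 1 - (m : Int)) h1n h1n'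
    refine ⟨PySem.Int.bxor x (xorFn rs (rs + L - 1 - (m : Int))),
      (bstep (bstep (H, Lo) (rs - 1)) (rs + L - 1 - (m : Int))).1,
      (bstep (bstep (H, Lo) (rs - 1)) (rs + L - 1 - (m : Int))).2,
      h2n, h2n', ?_, ?_, ?_⟩
    · rw [h2eq, h1eq, hmix]
      unfold xorFn
      exact bxor_rot x (prefXor (rs - 1)) (prefXor (rs + L - 1 - (m : Int)))
        (hmix ▸ bxor_nonneg H Lo hH hLo) (prefXor_nonneg _) (prefXor_nonneg _)
    · rw [Prod.mk.injEq, Prod.mk.injEq]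
      exact ⟨rfl, rfl, by rw [hrs]; ring⟩
    · rw [Prod.mk.injEq, Prod.mk.injEq]
      exact ⟨by rw [hrs]; ring, rfl, rfl⟩

-- ===== VERDICT (by name: the statement is the Claim_ definition above) =====
theorem solution_spec : Claim_equal_solution := by
  intro start length _hdom
  show solution start length = solution_alt start length
  by_cases hL : length ≤ 0
  · unfold solution solution_alt
    rw [PySem.List.pyRange_one_eq_nil hL]
    simp only [List.foldl_nil]
    rfl
  · have hcast : ((length.toNat : Nat) : Int) = length := Int.toNat_of_nonneg (by omega)
    obtain ⟨x, H, Lo, _, _, hmix, hA, hB⟩ := loops length start length.toNat (le_of_eq hcast)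
    rw [hcast] at hA hB
    unfold solution solution_alt
    rw [hA, hB]
    exact hmix.symm
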